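-- pv_equiv track=rewrite | github.com/switzerb/aoc-python | 2023/day11/day11.py | sum_distances
-- ===== SOURCE A (Python) =====
-- def sum_distances(counts, multiplier):
--     total = partial_sum = previous = space = 0
--
--     for n in counts:
--         if n:
--             total += n * (previous * space - partial_sum)
--             partial_sum += n * space
--             previous += n
--             space += 1
--         else:
--             space += multiplier
--
--     return total
-- ===== SOURCE B (Python) =====
-- def sum_distances(counts, multiplier):
--     # Phase 1: materialize (coordinate, count) entries for non-empty positions.
--     entries = []
--     coord = 0
--     for n in counts:
--         if n:
--             entries.append((coord, n))
--             coord += 1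
--         else:
--             coord += multiplier
--     # Phase 2: all-pairs weighted distance sum.
--     total = 0
--     seen = []
--     for (cj, nj) in entries:
--         for (ci, ni) in seen:
--             total += ni * nj * (cj - ci)
--         seen.append((cj, nj))
--     return total
-- ===== Notes on version B (the rewrite author's own statement) =====
-- stated objective: alternative
-- what changed: Replaced A's single fused incremental pass (running total/partial_sum/previous accumulators) with a two-phase algorithm: first materialize (coordinate, count) entries along the expanding axis, then compute the total by an explicit all-pairs double loop over those entries.
import Mathlib
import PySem

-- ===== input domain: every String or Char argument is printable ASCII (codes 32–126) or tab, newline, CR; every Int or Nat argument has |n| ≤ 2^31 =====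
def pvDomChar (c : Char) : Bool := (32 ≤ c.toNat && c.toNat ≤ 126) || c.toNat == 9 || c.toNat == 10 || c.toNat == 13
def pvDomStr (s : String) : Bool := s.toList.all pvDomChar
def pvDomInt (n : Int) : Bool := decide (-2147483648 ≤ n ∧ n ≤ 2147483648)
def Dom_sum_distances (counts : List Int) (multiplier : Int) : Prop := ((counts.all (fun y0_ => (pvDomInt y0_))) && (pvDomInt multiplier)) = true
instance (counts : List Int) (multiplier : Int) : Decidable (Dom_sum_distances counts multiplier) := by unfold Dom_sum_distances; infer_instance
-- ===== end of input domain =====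

-- B replaces A's fused one-pass accumulation by materializing (coordinate, count)
-- entries and an explicit all-pairs double loop (alternative decomposition, not faster).

-- ===== PORT A =====
-- state: (total, partial_sum, previous, space)
def sum_distances (counts : List Int) (multiplier : Int) : Int :=
  (counts.foldl
    (fun (st : Int × Int × Int × Int) n =>
      if n ≠ 0 then
        (st.1 + n * (st.2.2.1 * st.2.2.2 - st.2.1),
         st.2.1 + n * st.2.2.2,
         st.2.2.1 + n,
         st.2.2.2 + 1)
      else
        (st.1, st.2.1, st.2.2.1, st.2.2.2 + multiplier))
    (0, 0, 0, 0)).1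

-- ===== PORT B =====
-- phase 1: entries = list of (coord, count); state (entries, coord)
def sum_distances_alt (counts : List Int) (multiplier : Int) : Int :=
  let entries :=
    (counts.foldl
      (fun (st : List (Int × Int) × Int) n =>
        if n ≠ 0 then (st.1 ++ [(st.2, n)], st.2 + 1)
        else (st.1, st.2 + multiplier))
      ([], 0)).1
  -- phase 2: all-pairs loop; state (total, seen)
  (entries.foldl
    (fun (st : Int × List (Int × Int)) p =>
      (st.2.foldl (fun t q => t + q.2 * p.2 * (p.1 - q.1)) st.1,
       st.2 ++ [p]))
    (0, [])).1

-- ===== PRECONDITION & SPEC =====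
def Spec_sum_distances (counts : List Int) (multiplier : Int) (out : Int) : Prop := out = sum_distances_alt counts multiplier
instance (counts : List Int) (multiplier : Int) (out : Int) : Decidable (Spec_sum_distances counts multiplier out) := by unfold Spec_sum_distances; infer_instance

-- ===== CLAIM (what is proved, stated in full; the proofs are below) =====
def Claim_equal_sum_distances : Prop := ∀ (counts : List Int) (multiplier : Int), Dom_sum_distances counts multiplier → Spec_sum_distances counts multiplier (sum_distances counts multiplier)

-- ===== LEMMAS AND PROOFS =====

-- entries produced for `counts` starting at coordinate c
def entriesOf (m : Int) : List Int → Int → List (Int × Int)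
  | [], _ => []
  | n :: rest, c =>
    if n ≠ 0 then (c, n) :: entriesOf m rest (c + 1) else entriesOf m rest (c + m)

def wS (E : List (Int × Int)) : Int := (E.map (fun p => p.2)).sum          -- sum of counts
def wW (E : List (Int × Int)) : Int := (E.map (fun p => p.2 * p.1)).sum    -- weighted coords

def innW (seen : List (Int × Int)) (p : Int × Int) : Int :=
  (seen.map (fun q => q.2 * p.2 * (p.1 - q.1))).sum

def crossL (seen F : List (Int × Int)) : Int := (F.map (innW seen)).sum

def pairTotal : List (Int × Int) → Int
  | [] => 0
  | p :: rest => innW [p] |> (fun f => (rest.map f).sum) |> (· + pairTotal rest)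

theorem innW_append (s t : List (Int × Int)) (p : Int × Int) :
    innW (s ++ t) p = innW s p + innW t p := by
  simp [innW]

theorem innW_cons (q : Int × Int) (rest : List (Int × Int)) (p : Int × Int) :
    innW (q :: rest) p = q.2 * p.2 * (p.1 - q.1) + innW rest p := by
  simp [innW]

theorem innW_single_eq (s : List (Int × Int)) (p : Int × Int) :
    innW s p = p.2 * (wS s * p.1 - wW s) := by
  induction s with
  | nil => simp [innW, wS, wW]
  | cons q rest ih =>
    rw [innW_cons, ih]
    simp [wS, wW]
    ring

theorem crossL_append_singleton (seen : List (Int × Int)) (p : Int × Int)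
    (F : List (Int × Int)) :
    crossL (seen ++ [p]) F = crossL seen F + (F.map (innW [p])).sum := by
  induction F with
  | nil => simp [crossL]
  | cons r rest ih =>
    simp only [crossL, List.map_cons, List.sum_cons] at *
    rw [innW_append seen [p] r]
    omega

-- phase-2 fold invariant
theorem phase2_inv (F : List (Int × Int)) :
    ∀ (t : Int) (seen : List (Int × Int)),
    (F.foldl
      (fun (st : Int × List (Int × Int)) p =>
        (st.2.foldl (fun t q => t + q.2 * p.2 * (p.1 - q.1)) st.1,
         st.2 ++ [p]))
      (t, seen)).1 = t + crossL seen F + pairTotal F := by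
  induction F with
  | nil => intro t seen; simp [crossL, pairTotal]
  | cons p rest ih =>
    intro t seen
    have hfold : ∀ (s : List (Int × Int)) (t0 : Int),
        s.foldl (fun t q => t + q.2 * p.2 * (p.1 - q.1)) t0 = t0 + innW s p := by
      intro s
      induction s with
      | nil => intro t0; simp [innW]
      | cons q r ih2 =>
        intro t0
        rw [List.foldl_cons, ih2, innW_cons]
        ring
    simp only [List.foldl_cons, hfold]
    rw [ih, crossL_append_singleton]
    simp [crossL, pairTotal]
    ring

-- phase-1 fold invariant
theorem phase1_inv (m : Int) (counts : List Int) :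
    ∀ (acc : List (Int × Int)) (c : Int),
    (counts.foldl
      (fun (st : List (Int × Int) × Int) n =>
        if n ≠ 0 then (st.1 ++ [(st.2, n)], st.2 + 1)
        else (st.1, st.2 + m))
      (acc, c)).1 = acc ++ entriesOf m counts c := by
  induction counts with
  | nil => intro acc c; simp [entriesOf]
  | cons n rest ih =>
    intro acc c
    by_cases h : n = 0
    · simp only [List.foldl_cons, h]
      simpa [h, entriesOf] using ih acc (c + m)
    · simp only [List.foldl_cons, h, ne_eq, not_false_iff, if_true]
      rw [ih (acc ++ [(c, n)]) (c + 1)]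
      simp [entriesOf, h]

-- A's fold invariant
theorem afold_inv (m : Int) (counts : List Int) :
    ∀ (E : List (Int × Int)) (T c : Int),
    (counts.foldl
      (fun (st : Int × Int × Int × Int) n =>
        if n ≠ 0 then
          (st.1 + n * (st.2.2.1 * st.2.2.2 - st.2.1),
           st.2.1 + n * st.2.2.2,
           st.2.2.1 + n,
           st.2.2.2 + 1)
        else
          (st.1, st.2.1, st.2.2.1, st.2.2.2 + m))
      (T, wW E, wS E, c)).1
      = T + crossL E (entriesOf m counts c) + pairTotal (entriesOf m counts c) := by
  induction counts with
  | nil => intro E T c; simp [entriesOf, crossL, pairTotal]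
  | cons n rest ih =>
    intro E T c
    by_cases h : n = 0
    · simp only [List.foldl_cons, h]
      simpa [entriesOf, h] using ih E T (c + m)
    · simp only [List.foldl_cons, h, ne_eq, not_false_iff, if_true]
      have hW : wW E + n * c = wW (E ++ [(c, n)]) := by simp [wW]
      have hS : wS E + n = wS (E ++ [(c, n)]) := by simp [wS]
      rw [hW, hS, ih (E ++ [(c, n)]) (T + n * (wS E * c - wW E)) (c + 1)]
      simp only [entriesOf, h, ne_eq, not_false_iff, if_true]
      rw [crossL_append_singleton]
      simp only [crossL, pairTotal, List.map_cons, List.sum_cons]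
      rw [innW_single_eq]
      ring

-- ===== VERDICT (by name: the statement is the Claim_ definition above) =====
theorem sum_distances_spec : Claim_equal_sum_distances := by
  intro counts multiplier _
  unfold Spec_sum_distances sum_distances sum_distances_alt
  have hA := afold_inv multiplier counts [] 0 0
  have hB1 := phase1_inv multiplier counts [] 0
  simp only [wW, wS, List.map_nil, List.sum_nil] at hA
  rw [hA, hB1]
  simp only [List.nil_append]
  rw [phase2_inv (entriesOf multiplier counts 0) 0 []]
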